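-- pv_equiv track=rewrite | github.com/Peneyra/Gif_Builder | textcomp.py | coeff_unround
-- ===== SOURCE A (Python) =====
-- def coeff_unround(x):
--     if x == 0: return 0
--     k_cu = 1
--     n_cu = 3
--     for i in range(n_cu):
--         for j in range(2,11):
--             if x == k_cu: return (-1) * j * (10 ** i)
--             k_cu += 1
--             if x == k_cu: return        j * (10 ** i)
--             k_cu += 1
--     return 0
-- ===== SOURCE B (Python) =====
-- def coeff_unround(x):
--     # codes 1..54 encode signed j * 10**i with digit j in 2..10 and power i in 0..2
--     if not (1 <= x <= 54):
--         return 0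
--     p = (x - 1) // 2
--     sign = 1 if x % 2 == 0 else -1
--     return sign * (2 + p % 9) * 10 ** (p // 9)
-- ===== Notes on version B (the rewrite author's own statement) =====
-- stated objective: simpler
-- what changed: Replaced the nested counting loops (54 incremental comparisons) with a direct closed-form arithmetic decoding of the integer code x into sign, digit j and power-of-ten i.
import Mathlib
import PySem

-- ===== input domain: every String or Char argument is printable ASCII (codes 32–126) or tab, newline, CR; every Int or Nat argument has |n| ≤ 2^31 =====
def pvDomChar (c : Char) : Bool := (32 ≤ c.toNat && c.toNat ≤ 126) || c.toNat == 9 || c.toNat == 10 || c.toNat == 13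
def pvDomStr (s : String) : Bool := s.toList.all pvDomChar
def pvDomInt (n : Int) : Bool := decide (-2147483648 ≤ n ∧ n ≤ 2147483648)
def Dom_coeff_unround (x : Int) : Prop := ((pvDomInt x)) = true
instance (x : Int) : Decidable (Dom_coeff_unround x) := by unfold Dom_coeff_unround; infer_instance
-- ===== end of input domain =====

-- B replaces A's nested counting loops with a closed-form arithmetic decoding of x (simpler).
-- ===== PORT A =====
-- inner loop: for j in range(2,11): two compare-and-return steps per j, k advancing by 2
def pvLoopJ (x : Int) (i : Int) (k : Int) : List Int → Option Int × Int
  | [] => (none, k)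
  | j :: js =>
    if x = k then (some ((-1) * j * (10 ^ i.toNat)), k)
    else
      let k := k + 1
      if x = k then (some (j * (10 ^ i.toNat)), k)
      else pvLoopJ x i (k + 1) js

-- outer loop: for i in range(n_cu), threading k through
def pvLoopI (x : Int) (k : Int) : List Int → Option Int
  | [] => none
  | i :: is =>
    match pvLoopJ x i k (PySem.List.pyRange 2 11 1) with
    | (some r, _) => some r
    | (none, k') => pvLoopI x k' is

def coeff_unround (x : Int) : Int :=
  if x = 0 then 0
  else
    match pvLoopI x 1 (PySem.List.pyRange 0 3 1) with
    | some r => r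
    | none => 0

-- ===== PORT B =====
def coeff_unround_alt (x : Int) : Int :=
  if 1 ≤ x ∧ x ≤ 54 then
    let p := PySem.Int.floordiv (x - 1) 2
    let sign := if PySem.Int.mod x 2 = 0 then (1 : Int) else -1
    sign * (2 + PySem.Int.mod p 9) * (10 ^ (PySem.Int.floordiv p 9).toNat)
  else 0

-- ===== PRECONDITION & SPEC =====
def Spec_coeff_unround (x : Int) (out : Int) : Prop := out = coeff_unround_alt x
instance (x : Int) (out : Int) : Decidable (Spec_coeff_unround x out) := by unfold Spec_coeff_unround; infer_instance

-- ===== CLAIM (what is proved, stated in full; the proofs are below) =====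
def Claim_equal_coeff_unround : Prop := ∀ (x : Int), Dom_coeff_unround x → Spec_coeff_unround x (coeff_unround x)

-- ===== LEMMAS AND PROOFS =====
-- outside 1..54 both programs return 0
theorem pvLoopJ_none (x i k : Int) (js : List Int)
    (h : ∀ m : Int, k ≤ m → m < k + 2 * js.length → x ≠ m) :
    pvLoopJ x i k js = (none, k + 2 * js.length) := by
  induction js generalizing k with
  | nil => simp [pvLoopJ]
  | cons j js ih =>
    have h1 : x ≠ k := h k (le_refl k) (by simp only [List.length_cons]; push_cast; omega)
    have h2 : x ≠ k + 1 := h (k + 1) (by omega) (by simp only [List.length_cons]; push_cast; omega)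
    simp only [pvLoopJ, if_neg h1, if_neg h2]
    have := ih (k + 1 + 1) (fun m hm1 hm2 => h m (by omega)
      (by simp only [List.length_cons] at hm2 ⊢; push_cast at hm2 ⊢; omega))
    rw [this]
    simp only [List.length_cons, Prod.mk.injEq, true_and]; push_cast; ring

theorem pvLoopJ_len : (PySem.List.pyRange 2 11 1).length = 9 := by decide

theorem pvLoopI_none (x k : Int) (is : List Int)
    (h : ∀ m : Int, k ≤ m → m < k + 18 * is.length → x ≠ m) :
    pvLoopI x k is = none := by
  induction is generalizing k with
  | nil => simp [pvLoopI]
  | cons i is ih =>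
    have := pvLoopJ_none x i k (PySem.List.pyRange 2 11 1)
      (by rw [pvLoopJ_len]; intro m h1 h2; exact h m h1 (by simp; omega))
    rw [pvLoopJ_len] at this
    simp only [pvLoopI, this]
    exact ih (k + 2 * 9) (fun m h1 h2 => h m (by omega) (by simp at h2 ⊢; omega))

theorem coeff_out (x : Int) (hx : x < 1 ∨ 54 < x) : coeff_unround x = coeff_unround_alt x := by
  have hz : x ≠ 0 ∨ x = 0 := by omega
  have hA : coeff_unround x = 0 := by
    rcases hz with hz | hz
    · have := pvLoopI_none x 1 (PySem.List.pyRange 0 3 1)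
        (by intro m h1 h2; simp at h2; omega)
      simp [coeff_unround, hz, this]
    · simp [coeff_unround, hz]
  have hB : coeff_unround_alt x = 0 := by
    simp only [coeff_unround_alt]
    rw [if_neg (by omega)]
  rw [hA, hB]

-- ===== VERDICT (by name: the statement is the Claim_ definition above) =====
theorem coeff_unround_spec : Claim_equal_coeff_unround := by
  intro x _
  unfold Spec_coeff_unround
  by_cases h : 1 ≤ x ∧ x ≤ 54
  · obtain ⟨h1, h2⟩ := h
    interval_cases x <;> decide
  · exact coeff_out x (by omega)
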